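-- pv_equiv track=rewrite | github.com/wire-wqz/ConCM | prior/cub200/get_cub200_primitive_knowledge.py | get_max_num_attribute
-- ===== SOURCE A (Python) =====
-- from collections import Counter
--
-- def get_max_num_attribute(data):
--     data = [item for sublist in data for item in sublist]
--     ranges = [(1, 9), (10, 24), (25, 54), (55, 58), (59, 73),(74,79),(80,94), (95, 99), (100, 105), (106, 120), (121,135), (136, 149), (150, 152), (153, 167), (168, 182), (183, 197), (198, 212), (213, 217), (218, 222), (223, 236), (237, 240), (241, 244), (245, 248), (249, 263), (264, 278), (279, 293),(294,308),(309,312)]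
--     most_common_numbers = []
--     for r_start, r_end in ranges:
--         r_start=r_start-1
--         r_end=r_end-1
--         count = Counter()
--         for num in data:
--             if r_start <= num <= r_end:
--                 count[num] += 1
--         if count:
--             most_common_number = count.most_common(1)[0][0]
--         else:
--             most_common_number = None
--         most_common_numbers.append(most_common_number)
--         most_common_numbers = [num for num in most_common_numbers if num is not None]
--     return  most_common_numbers
-- ===== SOURCE B (Python) =====
-- from collections import Counter
--
-- RANGES = [(1, 9), (10, 24), (25, 54), (55, 58), (59, 73), (74, 79), (80, 94),
--           (95, 99), (100, 105), (106, 120), (121, 135), (136, 149), (150, 152),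
--           (153, 167), (168, 182), (183, 197), (198, 212), (213, 217), (218, 222),
--           (223, 236), (237, 240), (241, 244), (245, 248), (249, 263), (264, 278),
--           (279, 293), (294, 308), (309, 312)]
--
-- def get_max_num_attribute(data):
--     counts = Counter(n for sublist in data for n in sublist)
--     result = []
--     for start, end in RANGES:
--         s, e = start - 1, end - 1
--         best = max((n for n in counts if s <= n <= e), key=counts.get, default=None)
--         if best is not None:
--             result.append(best)
--     return result
-- ===== Notes on version B (the rewrite author's own statement) =====
-- stated objective: faster
-- what changed: B flattens once and builds a single global Counter, then picks each range's winner via max over the counter's keys with key=counts.get, instead of A's fresh Counter and full re-scan of the flattened data for each of the 28 ranges; ties still go to the first-appearance element.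
import Mathlib
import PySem

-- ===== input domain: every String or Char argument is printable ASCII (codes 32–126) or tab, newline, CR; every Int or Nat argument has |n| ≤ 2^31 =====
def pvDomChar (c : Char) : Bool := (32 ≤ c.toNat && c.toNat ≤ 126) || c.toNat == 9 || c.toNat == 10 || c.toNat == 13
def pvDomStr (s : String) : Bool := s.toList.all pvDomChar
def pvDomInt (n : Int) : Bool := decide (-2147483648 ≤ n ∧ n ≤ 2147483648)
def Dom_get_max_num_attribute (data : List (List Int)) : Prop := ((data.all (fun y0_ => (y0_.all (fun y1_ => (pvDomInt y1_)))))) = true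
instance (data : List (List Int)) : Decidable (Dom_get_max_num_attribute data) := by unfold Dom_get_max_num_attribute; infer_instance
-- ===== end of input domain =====

-- B builds ONE global Counter of the flattened data and picks each range's winner
-- with max over the counter's keys, instead of A's fresh per-range Counter loop
-- over all the data (objective: faster — one counting pass instead of 28, measured).

-- the 28 fixed ranges (shared literal from both sources)
def pvRanges : List (Int × Int) :=
  [(1, 9), (10, 24), (25, 54), (55, 58), (59, 73), (74, 79), (80, 94),
   (95, 99), (100, 105), (106, 120), (121, 135), (136, 149), (150, 152),
   (153, 167), (168, 182), (183, 197), (198, 212), (213, 217), (218, 222),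
   (223, 236), (237, 240), (241, 244), (245, 248), (249, 263), (264, 278),
   (279, 293), (294, 308), (309, 312)]

-- ===== PORT A =====
-- the inner 'for num in data: if r_start <= num <= r_end: count[num] += 1' loop
def pvCountA (flat : List Int) (s e : Int) : PySem.Dict Int Int :=
  flat.foldl (fun d num => if s ≤ num ∧ num ≤ e then d.modify num 0 (fun v => v + 1) else d)
    PySem.Dict.empty

-- one iteration of A's 'for r_start, r_end in ranges' loop
def pvStepA (flat : List Int) (acc : List (Option Int)) (r : Int × Int) : List (Option Int) :=
  let r_start := r.1 - 1
  let r_end := r.2 - 1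
  let count := pvCountA flat r_start r_end
  -- 'count.most_common(1)[0][0] if count else None': most_common(1) is the FIRST
  -- item of the counter (insertion order) with maximal count = PySem.List.max? on items
  let mc := (PySem.List.max? count.items (fun it => it.2)).map (fun it => it.1)
  (acc ++ [mc]).filter (fun o => o.isSome)

def get_max_num_attribute (data : List (List Int)) : List Int :=
  let flat := data.flatMap (fun sublist => sublist)
  -- A's returned list holds only ints (Nones are filtered each iteration);
  -- filterMap extracts them to give the List Int return type
  (pvRanges.foldl (pvStepA flat) []).filterMap (fun o => o)

-- ===== PORT B =====
-- one iteration of B's loop: winner = max over the global counter's keys in range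
def pvStepB (counts : PySem.Dict Int Int) (acc : List Int) (r : Int × Int) : List Int :=
  let s := r.1 - 1
  let e := r.2 - 1
  match PySem.List.max? (counts.keys.filter (fun n => decide (s ≤ n ∧ n ≤ e)))
      (fun n => counts.getD n 0) with
  | some best => acc ++ [best]
  | none => acc

def get_max_num_attribute_alt (data : List (List Int)) : List Int :=
  let counts := PySem.Dict.counter (data.flatMap (fun sublist => sublist))
  pvRanges.foldl (pvStepB counts) []

-- ===== PRECONDITION & SPEC =====
def Spec_get_max_num_attribute (data : List (List Int)) (out : List Int) : Prop := out = get_max_num_attribute_alt data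
instance (data : List (List Int)) (out : List Int) : Decidable (Spec_get_max_num_attribute data out) := by unfold Spec_get_max_num_attribute; infer_instance

-- ===== CLAIM (what is proved, stated in full; the proofs are below) =====
def Claim_equal_get_max_num_attribute : Prop := ∀ (data : List (List Int)), Dom_get_max_num_attribute data → Spec_get_max_num_attribute data (get_max_num_attribute data)

-- ===== LEMMAS AND PROOFS =====

-- A's guarded counting loop over any starting dict is a counting fold over the filtered list
theorem pvCountA_go (s e : Int) (xs : List Int) :
    ∀ (init : PySem.Dict Int Int),
      xs.foldl (fun d num => if s ≤ num ∧ num ≤ e then d.modify num 0 (fun v => v + 1) else d) init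
        = (xs.filter (fun num => decide (s ≤ num ∧ num ≤ e))).foldl
            (fun d x => d.modify x 0 (fun v => v + 1)) init := by
  induction xs with
  | nil => intro init; rfl
  | cons x t ih =>
    intro init
    by_cases h : s ≤ x ∧ x ≤ e
    · simp [h, ih]
    · simp [h, ih]

-- A's guarded counting loop is the counter of the filtered list
theorem pvCountA_eq_counter (flat : List Int) (s e : Int) :
    pvCountA flat s e
      = PySem.Dict.counter (flat.filter (fun num => decide (s ≤ num ∧ num ≤ e))) := by
  rw [PySem.Dict.counter_eq_foldl, pvCountA, pvCountA_go]

-- adding one element commutes with filter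
theorem pv_add_filter (p : Int → Bool) (acc : List Int) (x : Int) :
    (PySem.Set.add acc x).filter p
      = if p x then PySem.Set.add (acc.filter p) x else acc.filter p := by
  simp only [PySem.Set.add, PySem.Set.contains, List.contains_eq_mem, decide_eq_true_eq]
  by_cases hp : p x
  · by_cases hc : x ∈ acc
    · have hc' : x ∈ acc.filter p := List.mem_filter.mpr ⟨hc, hp⟩
      simp [hc, hc', hp]
    · have hc' : x ∉ acc.filter p := fun h => hc (List.mem_filter.mp h).1
      simp [hc, hc', hp, List.filter_append]
  · by_cases hc : x ∈ acc
    · simp [hc, hp]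
    · simp [hc, hp, List.filter_append]

theorem pv_ofList_filter_go (p : Int → Bool) (xs : List Int) :
    ∀ (acc : List Int),
      (xs.foldl PySem.Set.add acc).filter p = (xs.filter p).foldl PySem.Set.add (acc.filter p) := by
  induction xs with
  | nil => intro acc; rfl
  | cons x t ih =>
    intro acc
    by_cases hp : p x
    · simp only [List.foldl_cons, List.filter_cons, hp, if_pos, ih, pv_add_filter]
    · simp only [List.foldl_cons, List.filter_cons, hp, Bool.false_eq_true, ih,
        pv_add_filter]
      simp

-- first-occurrence dedup commutes with filter
theorem pv_ofList_filter (p : Int → Bool) (xs : List Int) :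
    PySem.Set.ofList (xs.filter p) = (PySem.Set.ofList xs).filter p := by
  rw [PySem.Set.ofList_eq_foldl, PySem.Set.ofList_eq_foldl, pv_ofList_filter_go]
  rfl

-- max? over a mapped list
theorem pv_max?_map_go {α β : Type} (f : α → β) (key : β → Int) (l : List α) :
    ∀ (acc : Option α),
      (l.map f).foldl
          (fun a y => match a with
            | none => some y
            | some m => if key m < key y then some y else some m) (acc.map f)
        = (l.foldl
            (fun a x => match a with
              | none => some x
              | some m => if key (f m) < key (f x) then some x else some m) acc).map f := by
  induction l with
  | nil => intro acc; rfl
  | cons x t ih =>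
    intro acc
    cases acc with
    | none => simpa using ih (some x)
    | some m =>
      simp only [List.map_cons, List.foldl_cons, Option.map_some]
      by_cases h : key (f m) < key (f x)
      · simpa [h] using ih (some x)
      · simpa [h] using ih (some m)

theorem pv_max?_map {α β : Type} (l : List α) (f : α → β) (key : β → Int) :
    PySem.List.max? (l.map f) key = (PySem.List.max? l (fun x => key (f x))).map f := by
  simpa using pv_max?_map_go f key l none

-- max? only depends on the key's values on the list
theorem pv_max?_congr_go {α : Type} (k1 k2 : α → Int) (l : List α)
    (h : ∀ x ∈ l, k1 x = k2 x) :
    ∀ (acc : Option α), (∀ m, acc = some m → k1 m = k2 m) →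
      l.foldl (fun a x => match a with
        | none => some x
        | some m => if k1 m < k1 x then some x else some m) acc
      = l.foldl (fun a x => match a with
        | none => some x
        | some m => if k2 m < k2 x then some x else some m) acc := by
  induction l with
  | nil => intro acc _; rfl
  | cons x t ih =>
    intro acc hacc
    have hx : k1 x = k2 x := h x (List.mem_cons_self)
    have ht : ∀ y ∈ t, k1 y = k2 y := fun y hy => h y (List.mem_cons_of_mem _ hy)
    cases acc with
    | none =>
      simp only [List.foldl_cons]
      exact ih ht (some x) (by intro m hm; cases hm; exact hx)
    | some m =>
      have hm : k1 m = k2 m := hacc m rfl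
      simp only [List.foldl_cons, hx, hm]
      by_cases hlt : k2 m < k2 x
      · simp only [if_pos hlt]
        exact ih ht (some x) (by intro n hn; cases hn; exact hx)
      · simp only [if_neg hlt]
        exact ih ht (some m) (by intro n hn; cases hn; exact hm)

theorem pv_max?_congr {α : Type} (l : List α) (k1 k2 : α → Int)
    (h : ∀ x ∈ l, k1 x = k2 x) :
    PySem.List.max? l k1 = PySem.List.max? l k2 := by
  exact pv_max?_congr_go k1 k2 l h none (by intro m hm; cases hm)

-- per-range winners coincide
theorem pv_core (flat : List Int) (r : Int × Int) :
    (PySem.List.max? (pvCountA flat (r.1 - 1) (r.2 - 1)).items (fun it => it.2)).map (fun it => it.1)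
      = PySem.List.max?
          ((PySem.Dict.counter flat).keys.filter (fun n => decide (r.1 - 1 ≤ n ∧ n ≤ r.2 - 1)))
          (fun n => (PySem.Dict.counter flat).getD n 0) := by
  rw [pvCountA_eq_counter, PySem.Dict.items_counter, PySem.Dict.keys_counter]
  rw [pv_max?_map]
  simp only [Option.map_map, Function.comp_def, Option.map_id_fun', id_eq]
  rw [pv_ofList_filter]
  simp only [PySem.Dict.getD_counter]
  apply pv_max?_congr
  intro k hk
  have hp : decide (r.1 - 1 ≤ k ∧ k ≤ r.2 - 1) = true := (List.mem_filter.mp hk).2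
  have hc := List.count_filter (p := fun num => decide (r.1 - 1 ≤ num ∧ num ≤ r.2 - 1))
    (a := k) (l := flat) hp
  exact_mod_cast hc

theorem pv_filter_isSome_map_some {α : Type} (l : List α) :
    (l.map some).filter (fun o => o.isSome) = l.map some := by
  rw [List.filter_eq_self]
  intro o ho
  rcases List.mem_map.mp ho with ⟨a, _, rfl⟩
  rfl

-- the two range loops agree, up to wrapping the winners in 'some'
theorem pv_outer (rs : List (Int × Int)) (flat : List Int) :
    ∀ (acc : List Int),
      rs.foldl (pvStepA flat) (acc.map some)
        = (rs.foldl (pvStepB (PySem.Dict.counter flat)) acc).map some := by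
  induction rs with
  | nil => intro acc; rfl
  | cons r t ih =>
    intro acc
    simp only [List.foldl_cons]
    have hcore := pv_core flat r
    cases hB : PySem.List.max?
        ((PySem.Dict.counter flat).keys.filter (fun n => decide (r.1 - 1 ≤ n ∧ n ≤ r.2 - 1)))
        (fun n => (PySem.Dict.counter flat).getD n 0) with
    | none =>
      have hA : pvStepA flat (acc.map some) r = acc.map some := by
        simp only [pvStepA, hcore, hB, List.filter_append, pv_filter_isSome_map_some]
        simp
      have hB' : pvStepB (PySem.Dict.counter flat) acc r = acc := by
        simp only [pvStepB]
        rw [hB]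
      rw [hA, hB', ih]
    | some b =>
      have hA : pvStepA flat (acc.map some) r = (acc ++ [b]).map some := by
        simp only [pvStepA, hcore, hB, List.filter_append, pv_filter_isSome_map_some]
        simp
      have hB' : pvStepB (PySem.Dict.counter flat) acc r = acc ++ [b] := by
        simp only [pvStepB]
        rw [hB]
      rw [hA, hB', ih]

-- ===== VERDICT (by name: the statement is the Claim_ definition above) =====
theorem get_max_num_attribute_spec : Claim_equal_get_max_num_attribute := by
  intro data _
  show List.filterMap (fun o => o)
        (pvRanges.foldl (pvStepA (data.flatMap (fun sublist => sublist))) [])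
      = pvRanges.foldl (pvStepB (PySem.Dict.counter (data.flatMap (fun sublist => sublist)))) []
  have h := pv_outer pvRanges (data.flatMap (fun sublist => sublist)) []
  simp only [List.map_nil] at h
  rw [h]
  simp [List.filterMap_map]
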